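-- pv_equiv track=rewrite | github.com/ssoeun-y/FoundSkelModel | scripts/visualize_boundary.py | get_gt_boundaries
-- ===== SOURCE A (Python) =====
-- def get_gt_boundaries(gt_labels):
--     """Returns (start_frames, end_frames) from integer label sequence."""
--     T = len(gt_labels)
--     starts, ends = [], []
--     for t in range(1, T):
--         if gt_labels[t] != 0 and gt_labels[t - 1] == 0:
--             starts.append(t)
--         if gt_labels[t] == 0 and gt_labels[t - 1] != 0:
--             ends.append(t - 1)
--     return starts, ends
-- ===== SOURCE B (Python) =====
-- def get_gt_boundaries(gt_labels):
--     """Returns (start_frames, end_frames) from integer label sequence.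
--
--     Run-based scan: walk maximal runs of equal activity (zero / nonzero)
--     instead of testing every adjacent pair."""
--     n = len(gt_labels)
--     starts, ends = [], []
--     i = 0
--     while i < n:
--         active = gt_labels[i] != 0
--         j = i + 1
--         while j < n and (gt_labels[j] != 0) == active:
--             j += 1
--         if active:
--             if i > 0:
--                 starts.append(i)
--             if j < n:
--                 ends.append(j - 1)
--         i = j
--     return starts, ends
-- ===== Notes on version B (the rewrite author's own statement) =====
-- stated objective: alternative
-- what changed: Replaced the per-index adjacent-pair test over range(1,T) with a run-based scan that jumps over maximal runs of equal activity (zero/nonzero) and emits a start/end per active run, guarded by the run touching the sequence boundary.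
import Mathlib
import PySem

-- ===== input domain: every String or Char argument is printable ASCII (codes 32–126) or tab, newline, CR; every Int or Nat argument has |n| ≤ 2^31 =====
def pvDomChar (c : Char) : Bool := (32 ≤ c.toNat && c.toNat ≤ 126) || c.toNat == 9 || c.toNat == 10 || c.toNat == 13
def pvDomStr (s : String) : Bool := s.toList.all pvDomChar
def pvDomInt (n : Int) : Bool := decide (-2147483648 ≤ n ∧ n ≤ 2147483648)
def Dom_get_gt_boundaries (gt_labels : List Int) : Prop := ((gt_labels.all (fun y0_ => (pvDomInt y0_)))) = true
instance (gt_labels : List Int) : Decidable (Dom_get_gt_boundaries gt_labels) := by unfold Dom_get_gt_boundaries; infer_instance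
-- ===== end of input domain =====

-- B replaces A's per-index adjacent-pair scan with a run-based scan over maximal
-- zero/nonzero runs (alternative decomposition, same complexity).


-- ===== PORT A =====
-- loop body of A's 'for t in range(1, T)' (two independent conditional appends)
def pvStepA (gt_labels : List Int) (acc : List Int × List Int) (t : Int) : List Int × List Int :=
  let acc := if PySem.List.pyGetD gt_labels t 0 ≠ 0 ∧ PySem.List.pyGetD gt_labels (t - 1) 0 = 0
             then (acc.1 ++ [t], acc.2) else acc
  let acc := if PySem.List.pyGetD gt_labels t 0 = 0 ∧ PySem.List.pyGetD gt_labels (t - 1) 0 ≠ 0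
             then (acc.1, acc.2 ++ [t - 1]) else acc
  acc

def get_gt_boundaries (gt_labels : List Int) : List Int × List Int :=
  let T : Int := gt_labels.length
  (PySem.List.pyRange 1 T 1).foldl (pvStepA gt_labels) ([], [])

-- ===== PORT B =====
-- inner 'while j < n and (gt_labels[j] != 0) == active: j += 1' of Source B:
-- number of leading elements of the suffix after position i with the given activity
def pvRunLen (b : Bool) : List Int → Nat
  | [] => 0
  | x :: xs => if decide (x ≠ 0) = b then pvRunLen b xs + 1 else 0

-- outer 'while i < n' of Source B, as recursion over the suffix starting at i
def pvAltGo (n : Int) (i : Int) (l : List Int) : List Int × List Int :=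
  match l with
  | [] => ([], [])
  | x :: xs =>
    let active := decide (x ≠ 0)
    let k := pvRunLen active xs
    let j : Int := i + 1 + k
    let rest := pvAltGo n j (xs.drop k)
    if active then
      ((if i > 0 then i :: rest.1 else rest.1),
       (if j < n then (j - 1) :: rest.2 else rest.2))
    else rest
termination_by l.length
decreasing_by simp [List.length_drop]

def get_gt_boundaries_alt (gt_labels : List Int) : List Int × List Int :=
  pvAltGo gt_labels.length 0 gt_labels

-- ===== PRECONDITION & SPEC =====
def Spec_get_gt_boundaries (gt_labels : List Int) (out : List Int × List Int) : Prop := out = get_gt_boundaries_alt gt_labels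
instance (gt_labels : List Int) (out : List Int × List Int) : Decidable (Spec_get_gt_boundaries gt_labels out) := by unfold Spec_get_gt_boundaries; infer_instance

-- ===== CLAIM (what is proved, stated in full; the proofs are below) =====
def Claim_equal_get_gt_boundaries : Prop := ∀ (gt_labels : List Int), Dom_get_gt_boundaries gt_labels → Spec_get_gt_boundaries gt_labels (get_gt_boundaries gt_labels)

-- ===== LEMMAS AND PROOFS =====

-- reference recursion: pairwise boundary spec with explicit previous element
def pvSpec : Int → Option Int → List Int → List Int × List Int
  | _, _, [] => ([], [])
  | i, prev, x :: xs =>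
    let r := pvSpec (i + 1) (some x) xs
    match prev with
    | none => r
    | some p =>
      ((if x ≠ 0 ∧ p = 0 then i :: r.1 else r.1),
       (if x = 0 ∧ p ≠ 0 then (i - 1) :: r.2 else r.2))

lemma pvAltGo_nil (n i : Int) : pvAltGo n i [] = ([], []) := by
  rw [pvAltGo]

lemma pvAltGo_cons (n i x : Int) (xs : List Int) :
    pvAltGo n i (x :: xs) =
      (if decide (x ≠ 0) then
        ((if i > 0 then i :: (pvAltGo n (i + 1 + (pvRunLen (decide (x ≠ 0)) xs : Int)) (xs.drop (pvRunLen (decide (x ≠ 0)) xs))).1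
          else (pvAltGo n (i + 1 + (pvRunLen (decide (x ≠ 0)) xs : Int)) (xs.drop (pvRunLen (decide (x ≠ 0)) xs))).1),
         (if i + 1 + (pvRunLen (decide (x ≠ 0)) xs : Int) < n then
            (i + 1 + (pvRunLen (decide (x ≠ 0)) xs : Int) - 1) :: (pvAltGo n (i + 1 + (pvRunLen (decide (x ≠ 0)) xs : Int)) (xs.drop (pvRunLen (decide (x ≠ 0)) xs))).2
          else (pvAltGo n (i + 1 + (pvRunLen (decide (x ≠ 0)) xs : Int)) (xs.drop (pvRunLen (decide (x ≠ 0)) xs))).2))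
       else pvAltGo n (i + 1 + (pvRunLen (decide (x ≠ 0)) xs : Int)) (xs.drop (pvRunLen (decide (x ≠ 0)) xs))) := by
  rw [pvAltGo.eq_def]

lemma pvRunLen_le (b : Bool) (xs : List Int) : pvRunLen b xs ≤ xs.length := by
  induction xs with
  | nil => simp [pvRunLen]
  | cons x xs ih => simp only [pvRunLen, List.length_cons]; split_ifs <;> omega

lemma pvRunLen_take (b : Bool) (xs : List Int) :
    ∀ y ∈ xs.take (pvRunLen b xs), decide (y ≠ 0) = b := by
  induction xs with
  | nil => simp
  | cons x xs ih =>
    simp only [pvRunLen]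
    split_ifs with h
    · intro y hy
      rcases List.mem_cons.mp (by simpa using hy) with rfl | hy'
      · exact h
      · exact ih y hy'
    · simp

lemma pvRunLen_drop (b : Bool) (xs : List Int) :
    ∀ y ys, xs.drop (pvRunLen b xs) = y :: ys → decide (y ≠ 0) ≠ b := by
  induction xs with
  | nil => simp
  | cons x xs ih =>
    simp only [pvRunLen]
    split_ifs with h
    · intro y ys hy; exact ih y ys (by simpa using hy)
    · intro y ys hy
      simp only [List.drop_zero] at hy
      cases hy; exact h

-- walking pvSpec through a run of equal activity contributes nothing
lemma pvSpec_skip_run (rest : List Int) (b : Bool) :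
    ∀ (run : List Int) (i : Int) (p : Int),
      decide (p ≠ 0) = b → (∀ y ∈ run, decide (y ≠ 0) = b) →
      ∃ p', decide (p' ≠ 0) = b ∧
        pvSpec i (some p) (run ++ rest) = pvSpec (i + run.length) (some p') rest := by
  intro run
  induction run with
  | nil => intro i p hp _; exact ⟨p, hp, by simp⟩
  | cons y run ih =>
    intro i p hp hall
    have hy : decide (y ≠ 0) = b := hall y (by simp)
    obtain ⟨p', hp', heq⟩ := ih (i + 1) y hy (fun z hz => hall z (by simp [hz]))
    refine ⟨p', hp', ?_⟩
    have hnc : pvSpec i (some p) ((y :: run) ++ rest) = pvSpec (i + 1) (some y) (run ++ rest) := by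
      cases b with
      | true =>
        have hp0 : p ≠ 0 := by simpa using hp
        have hy0 : y ≠ 0 := by simpa using hy
        simp [pvSpec, hp0, hy0]
      | false =>
        have hp0 : p = 0 := by simpa using hp
        have hy0 : y = 0 := by simpa using hy
        simp [pvSpec, hp0, hy0]
    have harith : i + ((y :: run).length : Int) = i + 1 + (run.length : Int) := by
      simp only [List.length_cons]; push_cast; omega
    rw [hnc, heq, harith]

lemma pvAltGo_eq_spec : ∀ (m : Nat) (n : Int) (xs : List Int) (i : Int) (prev : Option Int),
    xs.length ≤ m → i + xs.length = n →
    (prev = none ∧ i = 0 ∨ prev = some 0 ∧ 0 < i) →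
    pvAltGo n i xs = pvSpec i prev xs := by
  intro m
  induction m with
  | zero =>
    intro n xs i prev hm _ hinv
    have hxs : xs = [] := List.length_eq_zero_iff.mp (Nat.le_zero.mp hm)
    subst hxs
    rcases hinv with ⟨rfl, _⟩ | ⟨rfl, _⟩ <;> simp [pvAltGo_nil, pvSpec]
  | succ m ih =>
    intro n xs i prev hm hn hinv
    cases xs with
    | nil =>
      rcases hinv with ⟨rfl, _⟩ | ⟨rfl, _⟩ <;> simp [pvAltGo_nil, pvSpec]
    | cons x xs' =>
      have hi0 : 0 ≤ i := by rcases hinv with ⟨_, h⟩ | ⟨_, h⟩ <;> omega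
      have hlen : i + 1 + ((xs' : List Int).length : Int) = n := by
        simp only [List.length_cons] at hn; push_cast at hn ⊢; omega
      by_cases hx : x = 0
      -- ============ inactive run ============
      · have hb : decide (x ≠ 0) = false := by simp [hx]
        have hkle := pvRunLen_le false xs'
        obtain ⟨p', hp', hwalk⟩ := pvSpec_skip_run (xs'.drop (pvRunLen false xs')) false
          (xs'.take (pvRunLen false xs')) (i + 1) x (by simp [hx])
          (pvRunLen_take false xs')
        rw [List.take_append_drop] at hwalk
        have hp'0 : p' = 0 := by simpa using hp'
        subst hp'0
        have hlentake : (((xs'.take (pvRunLen false xs')).length : Nat) : Int)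
            = ((pvRunLen false xs' : Nat) : Int) := by
          simp [List.length_take, Nat.min_eq_left hkle]
        rw [hlentake] at hwalk
        have hR : pvAltGo n (i + 1 + (pvRunLen false xs' : Int)) (xs'.drop (pvRunLen false xs'))
            = pvSpec (i + 1 + (pvRunLen false xs' : Int)) (some 0) (xs'.drop (pvRunLen false xs')) := by
          refine ih n _ _ (some 0) ?_ ?_ (Or.inr ⟨rfl, by positivity⟩)
          · have : xs'.length ≤ m := by simpa using Nat.succ_le_succ_iff.mp (by simpa using hm)
            simp only [List.length_drop]; omega
          · simp only [List.length_drop]; push_cast [hkle]; omega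
        have haltgo : pvAltGo n i (x :: xs')
            = pvAltGo n (i + 1 + (pvRunLen false xs' : Int)) (xs'.drop (pvRunLen false xs')) := by
          rw [pvAltGo_cons]; simp [hb]
        rw [haltgo, hR, ← hwalk]
        rcases hinv with ⟨rfl, _⟩ | ⟨rfl, _⟩
        · rfl
        · simp [pvSpec, hx]
      -- ============ active run ============
      · have hb : decide (x ≠ 0) = true := by simp [hx]
        have hkle := pvRunLen_le true xs'
        obtain ⟨p', hp', hwalk⟩ := pvSpec_skip_run (xs'.drop (pvRunLen true xs')) true
          (xs'.take (pvRunLen true xs')) (i + 1) x (by simp [hx])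
          (pvRunLen_take true xs')
        rw [List.take_append_drop] at hwalk
        have hp'0 : p' ≠ 0 := by simpa using hp'
        have hlentake : (((xs'.take (pvRunLen true xs')).length : Nat) : Int)
            = ((pvRunLen true xs' : Nat) : Int) := by
          simp [List.length_take, Nat.min_eq_left hkle]
        rw [hlentake] at hwalk
        have hR : pvAltGo n (i + 1 + (pvRunLen true xs' : Int)) (xs'.drop (pvRunLen true xs'))
            = pvSpec (i + 1 + (pvRunLen true xs' : Int)) (some 0) (xs'.drop (pvRunLen true xs')) := by
          refine ih n _ _ (some 0) ?_ ?_ (Or.inr ⟨rfl, by positivity⟩)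
          · have : xs'.length ≤ m := by simpa using Nat.succ_le_succ_iff.mp (by simpa using hm)
            simp only [List.length_drop]; omega
          · simp only [List.length_drop]; push_cast [hkle]; omega
        have haltgo : pvAltGo n i (x :: xs')
            = ((if i > 0 then i :: (pvAltGo n (i + 1 + (pvRunLen true xs' : Int)) (xs'.drop (pvRunLen true xs'))).1
                else (pvAltGo n (i + 1 + (pvRunLen true xs' : Int)) (xs'.drop (pvRunLen true xs'))).1),
               (if i + 1 + (pvRunLen true xs' : Int) < n then
                  (i + 1 + (pvRunLen true xs' : Int) - 1) :: (pvAltGo n (i + 1 + (pvRunLen true xs' : Int)) (xs'.drop (pvRunLen true xs'))).2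
                else (pvAltGo n (i + 1 + (pvRunLen true xs' : Int)) (xs'.drop (pvRunLen true xs'))).2)) := by
          rw [pvAltGo_cons]; simp [hb]
        have hspec_head : pvSpec i prev (x :: xs') =
            (match prev with
             | none => pvSpec (i + 1) (some x) xs'
             | some p => ((if x ≠ 0 ∧ p = 0 then i :: (pvSpec (i + 1) (some x) xs').1 else (pvSpec (i + 1) (some x) xs').1),
                          (if x = 0 ∧ p ≠ 0 then (i - 1) :: (pvSpec (i + 1) (some x) xs').2 else (pvSpec (i + 1) (some x) xs').2))) := by
          cases prev <;> rfl
        cases hrest : xs'.drop (pvRunLen true xs') with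
        | nil =>
          have hkeq : pvRunLen true xs' = xs'.length := by
            have := List.length_drop (l := xs') (i := pvRunLen true xs')
            rw [hrest] at this; simp at this; omega
          have hjn : ¬ (i + 1 + (pvRunLen true xs' : Int) < n) := by
            rw [hkeq]; omega
          rw [hrest] at hwalk hR haltgo
          have hR0 : pvAltGo n (i + 1 + (pvRunLen true xs' : Int)) ([] : List Int) = ([], []) :=
            pvAltGo_nil _ _
          rcases hinv with ⟨rfl, rfl⟩ | ⟨rfl, hip⟩
          · simp only [zero_add] at hwalk hR0 hjn haltgo
            rw [haltgo, hR0]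
            simp [pvSpec, hwalk, hjn]
          · rw [haltgo, hR0]
            simp [pvSpec, hwalk, hjn, hip, hx]
        | cons y rest' =>
          have hy0 : y = 0 := by
            have := pvRunLen_drop true xs' y rest' hrest
            simpa using this
          subst hy0
          have hjn : i + 1 + (pvRunLen true xs' : Int) < n := by
            have := List.length_drop (l := xs') (i := pvRunLen true xs')
            rw [hrest] at this
            simp only [List.length_cons] at this
            omega
          rw [hrest] at hwalk hR haltgo
          -- unfold one step of the walked spec and of the clean spec at the zero head
          have hinner : pvSpec (i + 1 + (pvRunLen true xs' : Int)) (some p') ((0 : Int) :: rest')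
              = ((pvSpec (i + 1 + (pvRunLen true xs' : Int) + 1) (some 0) rest').1,
                 (i + 1 + (pvRunLen true xs' : Int) - 1) :: (pvSpec (i + 1 + (pvRunLen true xs' : Int) + 1) (some 0) rest').2) := by
            simp [pvSpec, hp'0]
          have hclean : pvSpec (i + 1 + (pvRunLen true xs' : Int)) (some 0) ((0 : Int) :: rest')
              = pvSpec (i + 1 + (pvRunLen true xs' : Int) + 1) (some 0) rest' := by
            simp [pvSpec]
          rcases hinv with ⟨rfl, rfl⟩ | ⟨rfl, hip⟩
          · simp only [zero_add] at hwalk hR hjn haltgo hinner hclean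
            rw [haltgo, hR, hclean]
            simp [pvSpec, hwalk, hjn, hp'0]
          · rw [haltgo, hR, hclean]
            simp [pvSpec, hwalk, hjn, hip, hx, hp'0]

-- A's fold over range(k, T) computes pvSpec on the suffix from k
lemma pvFoldA_eq_spec (l : List Int) : ∀ (m k : Nat) (s e : List Int), 1 ≤ k → l.length - k ≤ m →
    (PySem.List.pyRange (k : Int) (l.length : Int) 1).foldl (pvStepA l) (s, e)
      = (s ++ (pvSpec (k : Int) (some (PySem.List.pyGetD l ((k : Int) - 1) 0)) (l.drop k)).1,
         e ++ (pvSpec (k : Int) (some (PySem.List.pyGetD l ((k : Int) - 1) 0)) (l.drop k)).2) := by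
  intro m
  induction m with
  | zero =>
    intro k s e hk hm
    have hge : l.length ≤ k := by omega
    have h1 : PySem.List.pyRange (k : Int) (l.length : Int) 1 = [] :=
      PySem.List.pyRange_one_eq_nil (by exact_mod_cast hge)
    have h2 : l.drop k = [] := List.drop_eq_nil_of_le hge
    simp [h1, h2, pvSpec]
  | succ m ih =>
    intro k s e hk hm
    by_cases hlt : k < l.length
    · have hcons : PySem.List.pyRange (k : Int) (l.length : Int) 1
          = (k : Int) :: PySem.List.pyRange ((k : Int) + 1) (l.length : Int) 1 :=
        PySem.List.pyRange_one_cons (by exact_mod_cast hlt)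
      have hcur : PySem.List.pyGetD l (k : Int) 0 = l[k] := by
        rw [PySem.List.pyGetD_natCast]; exact List.getD_eq_getElem l 0 hlt
      have hdrop : l.drop k = l[k] :: l.drop (k + 1) := List.drop_eq_getElem_cons hlt
      have hstep : pvStepA l (s, e) (k : Int)
          = ((if l[k] ≠ 0 ∧ PySem.List.pyGetD l ((k : Int) - 1) 0 = 0 then s ++ [(k : Int)] else s),
             (if l[k] = 0 ∧ PySem.List.pyGetD l ((k : Int) - 1) 0 ≠ 0 then e ++ [(k : Int) - 1] else e)) := by
        simp only [pvStepA, hcur]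
        split_ifs with h1 h2 h2 <;> simp_all
      have hcast : ((k : Int) + 1) = ((k + 1 : Nat) : Int) := by push_cast; ring
      have hprev : PySem.List.pyGetD l (((k + 1 : Nat) : Int) - 1) 0 = l[k] := by
        have : (((k + 1 : Nat) : Int) - 1) = (k : Int) := by push_cast; ring
        rw [this, hcur]
      rw [hcons, List.foldl_cons, hstep, hcast,
        ih (k + 1) _ _ (by omega) (by omega), hprev, hdrop]
      simp only [pvSpec]
      split_ifs with h1 h2 h2
      · exact absurd h2.1 h1.1
      · rw [← hcast]; simp [List.append_assoc]
      · rw [← hcast]; simp [List.append_assoc]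
      · rw [← hcast]
    · have hge : l.length ≤ k := by omega
      have h1 : PySem.List.pyRange (k : Int) (l.length : Int) 1 = [] :=
        PySem.List.pyRange_one_eq_nil (by exact_mod_cast hge)
      have h2 : l.drop k = [] := List.drop_eq_nil_of_le hge
      simp [h1, h2, pvSpec]

lemma pvA_eq_spec (l : List Int) : get_gt_boundaries l = pvSpec 0 none l := by
  cases l with
  | nil => rfl
  | cons x xs =>
    have h := pvFoldA_eq_spec (x :: xs) (x :: xs).length 1 [] [] (by omega) (by omega)
    have hprev : PySem.List.pyGetD (x :: xs) ((1 : Int) - 1) 0 = x := by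
      norm_num [PySem.List.pyGetD_zero_cons]
    have hone : ((1 : Nat) : Int) = (1 : Int) := by norm_num
    rw [hone] at h
    rw [get_gt_boundaries, h, hprev]
    simp [pvSpec]

lemma pvB_eq_spec (l : List Int) : get_gt_boundaries_alt l = pvSpec 0 none l := by
  exact pvAltGo_eq_spec l.length (l.length : Int) l 0 none (le_refl _) (by simp)
    (Or.inl ⟨rfl, rfl⟩)

-- ===== VERDICT (by name: the statement is the Claim_ definition above) =====
theorem get_gt_boundaries_spec : Claim_equal_get_gt_boundaries := by
  intro l _
  unfold Spec_get_gt_boundaries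
  rw [pvA_eq_spec, pvB_eq_spec]
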